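-- pv_equiv track=rewrite | github.com/karpathy/jobs | brazil/build_site_data_br.py | build_demographics
-- ===== SOURCE A (Python) =====
-- def build_demographics(demo_entry):
--     """Convert race x gender nested dict into simple demographic totals.
--
--     Input: {race_code: {gender_code: count, ...}, ...}
--     Output: dict with total_feminino, total_masculino, total_branca, total_negra, etc.
--     """
--     total_masc = 0
--     total_fem = 0
--     total_branca = 0
--     total_preta = 0
--     total_parda = 0
--
--     for race_code, genders in demo_entry.items():
--         masc = genders.get("1", 0)
--         fem = genders.get("2", 0)
--         total_masc += masc
--         total_fem += fem
--
--         if race_code == "2":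
--             total_branca += masc + fem
--         elif race_code == "4":
--             total_preta += masc + fem
--         elif race_code == "8":
--             total_parda += masc + fem
--
--     return {
--         "total_feminino": total_fem,
--         "total_masculino": total_masc,
--         "total_branca": total_branca,
--         "total_negra": total_preta + total_parda,
--         "total_preta": total_preta,
--         "total_parda": total_parda,
--     }
-- ===== SOURCE B (Python) =====
-- def build_demographics(demo_entry):
--     """Convert race x gender nested dict into simple demographic totals."""
--     total_masc = sum(g.get("1", 0) for g in demo_entry.values())
--     total_fem = sum(g.get("2", 0) for g in demo_entry.values())
--
--     def race_total(code):
--         g = demo_entry.get(code, {})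
--         return g.get("1", 0) + g.get("2", 0)
--
--     preta = race_total("4")
--     parda = race_total("8")
--     return {
--         "total_feminino": total_fem,
--         "total_masculino": total_masc,
--         "total_branca": race_total("2"),
--         "total_negra": preta + parda,
--         "total_preta": preta,
--         "total_parda": parda,
--     }
-- ===== Notes on version B (the rewrite author's own statement) =====
-- stated objective: simpler
-- what changed: Replaces the single branching scan carrying five accumulators with two summation comprehensions over the values for the gender totals plus direct dict lookups of the three known race codes for the race totals; Pre_ only excludes association lists with duplicate outer race keys, which no Python dict can represent.
import Mathlib
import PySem

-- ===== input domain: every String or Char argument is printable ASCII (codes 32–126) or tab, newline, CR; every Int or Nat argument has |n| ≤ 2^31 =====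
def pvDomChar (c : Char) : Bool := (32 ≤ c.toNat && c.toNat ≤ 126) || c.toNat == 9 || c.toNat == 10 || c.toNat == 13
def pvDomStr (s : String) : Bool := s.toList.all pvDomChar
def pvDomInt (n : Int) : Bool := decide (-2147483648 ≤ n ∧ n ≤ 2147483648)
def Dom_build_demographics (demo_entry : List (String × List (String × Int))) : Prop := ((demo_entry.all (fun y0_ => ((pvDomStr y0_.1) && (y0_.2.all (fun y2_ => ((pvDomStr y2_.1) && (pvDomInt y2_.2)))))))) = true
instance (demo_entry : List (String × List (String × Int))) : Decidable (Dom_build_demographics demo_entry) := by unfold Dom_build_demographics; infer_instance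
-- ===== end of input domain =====

-- B replaces A's five-accumulator branching scan by two sum-comprehensions for the gender
-- totals plus direct lookups of the three known race codes (objective: simpler).

-- ===== PORT A =====
def build_demographics (demo_entry : List (String × List (String × Int))) : List (String × Int) :=
  let st := demo_entry.foldl
    (fun (st : Int × Int × Int × Int × Int) rg =>
      let (tm, tf, tb, tp, tpa) := st
      let masc := (PySem.Dict.mk rg.2).getD "1" 0
      let fem := (PySem.Dict.mk rg.2).getD "2" 0
      let tm := tm + masc
      let tf := tf + fem
      if rg.1 == "2" then (tm, tf, tb + (masc + fem), tp, tpa)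
      else if rg.1 == "4" then (tm, tf, tb, tp + (masc + fem), tpa)
      else if rg.1 == "8" then (tm, tf, tb, tp, tpa + (masc + fem))
      else (tm, tf, tb, tp, tpa))
    (0, 0, 0, 0, 0)
  [("total_feminino", st.2.1), ("total_masculino", st.1), ("total_branca", st.2.2.1),
   ("total_negra", st.2.2.2.1 + st.2.2.2.2), ("total_preta", st.2.2.2.1),
   ("total_parda", st.2.2.2.2)]

-- ===== PORT B =====
-- Source B's race_total helper: demo_entry.get(code, {}) then add its "1" and "2" counts
def bdRaceTotal (demo_entry : List (String × List (String × Int))) (code : String) : Int :=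
  let g := (PySem.Dict.mk demo_entry).getD code []
  (PySem.Dict.mk g).getD "1" 0 + (PySem.Dict.mk g).getD "2" 0

def build_demographics_alt (demo_entry : List (String × List (String × Int))) : List (String × Int) :=
  let total_masc := (demo_entry.map (fun rg => (PySem.Dict.mk rg.2).getD "1" 0)).sum
  let total_fem := (demo_entry.map (fun rg => (PySem.Dict.mk rg.2).getD "2" 0)).sum
  let preta := bdRaceTotal demo_entry "4"
  let parda := bdRaceTotal demo_entry "8"
  [("total_feminino", total_fem), ("total_masculino", total_masc),
   ("total_branca", bdRaceTotal demo_entry "2"),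
   ("total_negra", preta + parda), ("total_preta", preta), ("total_parda", parda)]

-- ===== PRECONDITION & SPEC =====
-- Pre_ excludes association lists with duplicate outer race keys: a Python dict cannot have
-- duplicate keys, so these inputs are unreachable from Python; on such lists A's scan would sum
-- all occurrences while a dict lookup sees only the first.
def Pre_build_demographics (demo_entry : List (String × List (String × Int))) : Prop :=
  (demo_entry.map Prod.fst).Nodup
instance (demo_entry : List (String × List (String × Int))) : Decidable (Pre_build_demographics demo_entry) := by unfold Pre_build_demographics; infer_instance

def pvWitness_build_demographics : (List (String × List (String × Int))) :=
  [("2", [("1", 3), ("2", 4)]), ("4", [("1", 1)]), ("9", [("2", 5)])]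

def Spec_build_demographics (demo_entry : List (String × List (String × Int))) (out : List (String × Int)) : Prop := out = build_demographics_alt demo_entry
instance (demo_entry : List (String × List (String × Int))) (out : List (String × Int)) : Decidable (Spec_build_demographics demo_entry out) := by unfold Spec_build_demographics; infer_instance

-- ===== CLAIM (what is proved, stated in full; the proofs are below) =====
def Claim_equal_build_demographics : Prop := ∀ (demo_entry : List (String × List (String × Int))), Dom_build_demographics demo_entry → Pre_build_demographics demo_entry → Spec_build_demographics demo_entry (build_demographics demo_entry)

-- ===== LEMMAS AND PROOFS =====

theorem bd_getD_mk_cons {k x : String} {v : List (String × Int)}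
    (rest : List (String × List (String × Int))) :
    (PySem.Dict.mk ((k, v) :: rest)).getD x [] =
      if k == x then v else (PySem.Dict.mk rest).getD x [] := by
  simp only [PySem.Dict.getD_eq_get?_getD, PySem.Dict.get?_mk_cons]
  split <;> rfl

theorem bd_getD_not_mem {x : String} (l : List (String × List (String × Int)))
    (h : x ∉ l.map Prod.fst) : (PySem.Dict.mk l).getD x [] = [] := by
  induction l with
  | nil => rfl
  | cons p t ih =>
    obtain ⟨k, v⟩ := p
    simp only [List.map_cons, List.mem_cons] at h
    push Not at h
    rw [bd_getD_mk_cons]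
    simp only [beq_iff_eq]
    rw [if_neg (fun hk => h.1 hk.symm)]
    exact ih h.2

-- The fold in A, characterised on accumulators for Nodup outer keys.
theorem bd_fold_char (l : List (String × List (String × Int)))
    (hnd : (l.map Prod.fst).Nodup) (tm tf tb tp tpa : Int) :
    l.foldl
      (fun (st : Int × Int × Int × Int × Int) rg =>
        let (tm, tf, tb, tp, tpa) := st
        let masc := (PySem.Dict.mk rg.2).getD "1" 0
        let fem := (PySem.Dict.mk rg.2).getD "2" 0
        let tm := tm + masc
        let tf := tf + fem
        if rg.1 == "2" then (tm, tf, tb + (masc + fem), tp, tpa)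
        else if rg.1 == "4" then (tm, tf, tb, tp + (masc + fem), tpa)
        else if rg.1 == "8" then (tm, tf, tb, tp, tpa + (masc + fem))
        else (tm, tf, tb, tp, tpa))
      (tm, tf, tb, tp, tpa) =
    (tm + (l.map (fun rg => (PySem.Dict.mk rg.2).getD "1" 0)).sum,
     tf + (l.map (fun rg => (PySem.Dict.mk rg.2).getD "2" 0)).sum,
     tb + bdRaceTotal l "2", tp + bdRaceTotal l "4", tpa + bdRaceTotal l "8") := by
  induction l generalizing tm tf tb tp tpa with
  | nil => simp [bdRaceTotal]; decide
  | cons p t ih =>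
    obtain ⟨k, g⟩ := p
    simp only [List.map_cons, List.nodup_cons] at hnd
    have ht := ih hnd.2
    have hrt : ∀ code : String, bdRaceTotal ((k, g) :: t) code =
        if k == code then (PySem.Dict.mk g).getD "1" 0 + (PySem.Dict.mk g).getD "2" 0
        else bdRaceTotal t code := by
      intro code
      simp only [bdRaceTotal, bd_getD_mk_cons]
      split <;> rfl
    have hnot : ∀ code : String, k ≠ code → bdRaceTotal ((k, g) :: t) code = bdRaceTotal t code := by
      intro code hne; rw [hrt]; simp [hne]
    have habs : ∀ code : String, k = code → bdRaceTotal t code = 0 := by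
      intro code hk
      subst hk
      simp only [bdRaceTotal, bd_getD_not_mem t hnd.1]
      rfl
    simp only [List.foldl_cons, List.map_cons, List.sum_cons]
    by_cases h2 : k = "2"
    · subst h2
      rw [if_pos (by decide)]
      rw [ht, hnot "4" (by decide), hnot "8" (by decide), hrt "2"]
      simp only [BEq.rfl, if_pos, habs "2" rfl]
      ring_nf
    · by_cases h4 : k = "4"
      · subst h4
        rw [if_neg (by decide), if_pos (by decide)]
        rw [ht, hnot "2" (by decide), hnot "8" (by decide), hrt "4"]
        simp only [BEq.rfl, if_pos, habs "4" rfl]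
        ring_nf
      · by_cases h8 : k = "8"
        · subst h8
          rw [if_neg (by decide), if_neg (by decide), if_pos (by decide)]
          rw [ht, hnot "2" (by decide), hnot "4" (by decide), hrt "8"]
          simp only [BEq.rfl, if_pos, habs "8" rfl]
          ring_nf
        · rw [if_neg (by simpa using h2), if_neg (by simpa using h4), if_neg (by simpa using h8)]
          rw [ht, hnot "2" h2, hnot "4" h4, hnot "8" h8]
          ring_nf

-- ===== VERDICT (by name: the statement is the Claim_ definition above) =====
theorem build_demographics_spec : Claim_equal_build_demographics := by
  intro d _ hpre
  unfold Spec_build_demographics build_demographics build_demographics_alt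
  rw [bd_fold_char d hpre 0 0 0 0 0]
  simp
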